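-- pv_equiv track=rewrite | github.com/hungvu24/python_ptit | PYKT088.py | Solve
-- ===== SOURCE A (Python) =====
-- def Solve (num):
--     cnt = 0
--     i = 1
--     while i*i <= num:
--         if num % i == 0:
--             if i*i == num:
--                 cnt += 1
--             else:
--                 cnt += 2
--         i+=1
--     return cnt == 9
-- ===== SOURCE B (Python) =====
-- def Solve(num):
--     # Factor num by trial division and multiply (exponent+1) over its prime powers;
--     # num has exactly 9 divisors iff that product is 9.
--     if num <= 0:
--         return False
--     count = 1
--     n = num
--     p = 2
--     while p * p <= n:
--         if n % p == 0:
--             e = 0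
--             while n % p == 0:
--                 n //= p
--                 e += 1
--             count *= e + 1
--         p += 1
--     if n > 1:
--         count *= 2
--     return count == 9
-- ===== Notes on version B (the rewrite author's own statement) =====
-- stated objective: alternative
-- what changed: B replaces A's divisor-enumeration loop (count every i <= sqrt(num) dividing num, pairing i with num/i) by trial-division prime factorisation: it divides out each prime power p^e and multiplies a running divisor-count by (e+1), comparing the product with 9.
import Mathlib
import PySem

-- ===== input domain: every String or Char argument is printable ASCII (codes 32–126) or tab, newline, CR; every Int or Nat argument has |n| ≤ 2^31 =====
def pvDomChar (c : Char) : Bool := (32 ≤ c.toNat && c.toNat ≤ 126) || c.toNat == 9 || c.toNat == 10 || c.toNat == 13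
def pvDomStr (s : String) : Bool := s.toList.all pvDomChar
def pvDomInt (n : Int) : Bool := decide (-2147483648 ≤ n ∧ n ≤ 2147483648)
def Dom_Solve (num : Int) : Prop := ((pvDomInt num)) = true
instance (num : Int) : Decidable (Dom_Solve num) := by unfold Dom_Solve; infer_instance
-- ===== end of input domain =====

-- B replaces A's √num divisor-pair enumeration by trial-division prime factorisation
-- (multiply (exponent+1) over the prime powers); same cost class, no speed claim.

-- ===== PORT A =====
-- termination helper for the ports' while-loops: i*i ≤ num forces i ≤ num (over Int)
theorem pv_int_le_of_sq_le {i num : Int} (h : i * i ≤ num) : i ≤ num := by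
  nlinarith [mul_self_nonneg i, mul_self_nonneg (i - 1)]

theorem pv_ediv_lt {n p : Int} (hn : 1 ≤ n) (hp : 2 ≤ p) : n / p < n := by
  have h0 : 0 ≤ n / p := Int.ediv_nonneg (by omega) (by omega)
  have h1 := Int.mul_ediv_add_emod n p
  have h2' := Int.emod_nonneg n (show p ≠ 0 by omega)
  have h3 : 0 ≤ (p - 2) * (n / p) := mul_nonneg (by omega) h0
  nlinarith

-- while i*i <= num: if num % i == 0: cnt += (1 if i*i==num else 2); i += 1
def solveLoopA (num i cnt : Int) : Int :=
  if h : i * i ≤ num then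
    if PySem.Int.mod num i = 0 then
      if i * i = num then solveLoopA num (i + 1) (cnt + 1)
      else solveLoopA num (i + 1) (cnt + 2)
    else solveLoopA num (i + 1) cnt
  else cnt
termination_by (num + 1 - i).toNat
decreasing_by all_goals (have := pv_int_le_of_sq_le h; omega)

def Solve (num : Int) : Bool := solveLoopA num 1 0 == 9

-- ===== PORT B =====
-- inner `while n % p == 0: n //= p; e += 1`; the `2 ≤ p ∧ 1 ≤ n` guard only makes the
-- recursion total (every actual call from the outer loop satisfies it)
def divOutB (n p : Int) : Int × Int :=
  if h : 2 ≤ p ∧ 1 ≤ n ∧ PySem.Int.mod n p = 0 then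
    let r := divOutB (PySem.Int.floordiv n p) p
    (r.1, r.2 + 1)
  else (n, 0)
termination_by n.toNat
decreasing_by
  obtain ⟨hp, hn, -⟩ := h
  rw [PySem.Int.floordiv_eq_ediv_of_pos (by omega)]
  have h1 : n / p < n := pv_ediv_lt hn hp
  omega

theorem divOutB_fst_le_aux : ∀ (k : ℕ) (n p : Int), n.toNat ≤ k → (divOutB n p).1 ≤ n := by
  intro k
  induction k with
  | zero =>
    intro n p hk
    rw [divOutB.eq_def]
    split
    · next h => exact absurd h (by omega)
    · simp
  | succ k ih =>
    intro n p hk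
    rw [divOutB.eq_def]
    split
    · next h =>
      obtain ⟨hp, hn, -⟩ := h
      have h0 : PySem.Int.floordiv n p = n / p := PySem.Int.floordiv_eq_ediv_of_pos (by omega)
      have h1 : n / p < n := pv_ediv_lt hn hp
      have h2 := ih (PySem.Int.floordiv n p) p (by rw [h0]; omega)
      have h3 : PySem.Int.floordiv n p < n := by rw [h0]; exact h1
      show (divOutB (PySem.Int.floordiv n p) p).1 ≤ n
      exact le_trans h2 (le_of_lt h3)
    · simp

theorem divOutB_fst_le (n p : Int) : (divOutB n p).1 ≤ n :=
  divOutB_fst_le_aux n.toNat n p le_rfl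

-- outer `while p*p <= n:` loop of B; returns (n, count)
def loopB (n p count : Int) : Int × Int :=
  if h : p * p ≤ n then
    if PySem.Int.mod n p = 0 then
      let r := divOutB n p
      loopB r.1 (p + 1) (count * (r.2 + 1))
    else loopB n (p + 1) count
  else (n, count)
termination_by (n + 1 - p).toNat
decreasing_by
  · have h1 := pv_int_le_of_sq_le h
    have h2 := divOutB_fst_le n p
    omega
  · have := pv_int_le_of_sq_le h; omega

def Solve_alt (num : Int) : Bool :=
  if num ≤ 0 then false
  else
    let r := loopB num 2 1
    (if 1 < r.1 then r.2 * 2 else r.2) == 9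

-- ===== PRECONDITION & SPEC =====
def Spec_Solve (num : Int) (out : Bool) : Prop := out = Solve_alt num
instance (num : Int) (out : Bool) : Decidable (Spec_Solve num out) := by unfold Spec_Solve; infer_instance

-- ===== CLAIM (what is proved, stated in full; the proofs are below) =====
def Claim_equal_Solve : Prop := ∀ (num : Int), Dom_Solve num → Spec_Solve num (Solve num)

-- ===== LEMMAS AND PROOFS =====

-- ℕ-level mirror of A's loop (the Int port is bridged to it below)
def loopAN (N i cnt : ℕ) : ℕ :=
  if i * i ≤ N then
    if N % i = 0 then
      if i * i = N then loopAN N (i + 1) (cnt + 1)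
      else loopAN N (i + 1) (cnt + 2)
    else loopAN N (i + 1) cnt
  else cnt
termination_by N + 1 - i
decreasing_by all_goals
  (have : i ≤ i * i := by
    rcases Nat.eq_zero_or_pos i with h0 | h0
    · omega
    · exact Nat.le_mul_of_pos_left i h0
   omega)

-- ℕ-level mirror of B's inner division loop
def divOutN (n p : ℕ) : ℕ × ℕ :=
  if h : 2 ≤ p ∧ 1 ≤ n ∧ n % p = 0 then
    let r := divOutN (n / p) p
    (r.1, r.2 + 1)
  else (n, 0)
termination_by n
decreasing_by exact Nat.div_lt_self (by omega) (by omega)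

theorem divOutN_fst_le (n p : ℕ) : (divOutN n p).1 ≤ n := by
  rw [divOutN.eq_def]
  split
  · next h =>
    have h1 : n / p < n := Nat.div_lt_self (by omega) (by omega)
    have h2 := divOutN_fst_le (n / p) p
    show (divOutN (n / p) p).1 ≤ n
    omega
  · simp
termination_by n
decreasing_by exact Nat.div_lt_self (by omega) (by omega)

-- ℕ-level mirror of B's outer loop
def loopBN (n p count : ℕ) : ℕ × ℕ :=
  if p * p ≤ n then
    if n % p = 0 then
      let r := divOutN n p
      loopBN r.1 (p + 1) (count * (r.2 + 1))
    else loopBN n (p + 1) count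
  else (n, count)
termination_by n + 1 - p
decreasing_by all_goals
  (have hpn : p ≤ p * p := by
    rcases Nat.eq_zero_or_pos p with h0 | h0
    · omega
    · exact Nat.le_mul_of_pos_left p h0
   have := divOutN_fst_le n p
   omega)

-- ===== bridges: the Int ports compute the casts of the ℕ mirrors =====
theorem bridgeA : ∀ (k i cnt N : ℕ), N + 1 - i ≤ k →
    solveLoopA (N : Int) (i : Int) (cnt : Int) = (loopAN N i cnt : Int) := by
  intro k
  induction k with
  | zero =>
    intro i cnt N hk
    have hii : N < i * i := by
      have h1 : N + 1 ≤ i := by omega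
      have h2 : i ≤ i * i := Nat.le_mul_of_pos_left i (by omega)
      omega
    rw [solveLoopA.eq_def, loopAN.eq_def]
    rw [dif_neg (not_le.mpr (by exact_mod_cast hii : ((N:Int) < (i:Int) * i))), if_neg (by omega)]
  | succ k ih =>
    intro i cnt N hk
    rw [solveLoopA.eq_def, loopAN.eq_def]
    by_cases h1 : i * i ≤ N
    · have h1' : (i : Int) * i ≤ (N : Int) := by exact_mod_cast h1
      rw [dif_pos h1', if_pos h1]
      by_cases h2 : N % i = 0
      · have h2' : PySem.Int.mod (N : Int) (i : Int) = 0 := by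
          rw [PySem.Int.mod_natCast, h2]; rfl
        rw [if_pos h2', if_pos h2]
        by_cases h3 : i * i = N
        · have h3' : (i : Int) * i = (N : Int) := by exact_mod_cast h3
          rw [if_pos h3', if_pos h3]
          have := ih (i + 1) (cnt + 1) N (by omega)
          push_cast at this ⊢
          exact this
        · have h3' : ¬ ((i : Int) * i = (N : Int)) := by exact_mod_cast h3
          rw [if_neg h3', if_neg h3]
          have := ih (i + 1) (cnt + 2) N (by omega)
          push_cast at this ⊢
          exact this
      · have h2' : ¬ (PySem.Int.mod (N : Int) (i : Int) = 0) := by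
          rw [PySem.Int.mod_natCast]
          exact_mod_cast h2
        rw [if_neg h2', if_neg h2]
        have := ih (i + 1) cnt N (by omega)
        push_cast at this ⊢
        exact this
    · have h1' : ¬ ((i : Int) * i ≤ (N : Int)) := by exact_mod_cast h1
      rw [dif_neg h1', if_neg h1]

theorem bridgeDivOut : ∀ (k n p : ℕ), n ≤ k →
    divOutB (n : Int) (p : Int) = (((divOutN n p).1 : Int), ((divOutN n p).2 : Int)) := by
  intro k
  induction k with
  | zero =>
    intro n p hk
    rw [divOutB.eq_def, divOutN.eq_def]
    rw [dif_neg (show ¬ (2 ≤ (p:Int) ∧ 1 ≤ (n:Int) ∧ PySem.Int.mod (n:Int) (p:Int) = 0) by rintro ⟨a,b,c⟩; omega), dif_neg (by omega)]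
    rfl
  | succ k ih =>
    intro n p hk
    rw [divOutB.eq_def, divOutN.eq_def]
    by_cases h : 2 ≤ p ∧ 1 ≤ n ∧ n % p = 0
    · have h' : 2 ≤ (p : Int) ∧ 1 ≤ (n : Int) ∧ PySem.Int.mod (n : Int) (p : Int) = 0 := by
        refine ⟨by exact_mod_cast h.1, by exact_mod_cast h.2.1, ?_⟩
        rw [PySem.Int.mod_natCast, h.2.2]; rfl
      rw [dif_pos h', dif_pos h]
      have hfd : PySem.Int.floordiv (n : Int) (p : Int) = ((n / p : ℕ) : Int) :=
        PySem.Int.floordiv_natCast n p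
      have hlt : n / p < n := Nat.div_lt_self (by omega) (by omega)
      have := ih (n / p) p (by omega)
      show (((divOutB (PySem.Int.floordiv (n:Int) (p:Int)) (p:Int)).1),
            (divOutB (PySem.Int.floordiv (n:Int) (p:Int)) (p:Int)).2 + 1)
          = ((((divOutN (n/p) p).1 : ℕ) : Int), (((divOutN (n/p) p).2 + 1 : ℕ) : Int))
      rw [hfd, this]
      push_cast
      rfl
    · have h' : ¬ (2 ≤ (p : Int) ∧ 1 ≤ (n : Int) ∧ PySem.Int.mod (n : Int) (p : Int) = 0) := by
        rw [PySem.Int.mod_natCast]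
        intro ⟨a, b, c⟩
        exact h ⟨by exact_mod_cast a, by exact_mod_cast b, by exact_mod_cast c⟩
      rw [dif_neg h', dif_neg h]
      rfl

theorem bridgeB : ∀ (k n p count : ℕ), n + 1 - p ≤ k →
    loopB (n : Int) (p : Int) (count : Int)
      = (((loopBN n p count).1 : Int), ((loopBN n p count).2 : Int)) := by
  intro k
  induction k with
  | zero =>
    intro n p count hk
    have hii : n < p * p := by
      have h2 : p ≤ p * p := Nat.le_mul_of_pos_left p (by omega)
      omega
    rw [loopB.eq_def, loopBN.eq_def]
    rw [dif_neg (not_le.mpr (by exact_mod_cast hii : ((n:Int) < (p:Int) * p))), if_neg (by omega)]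
  | succ k ih =>
    intro n p count hk
    rw [loopB.eq_def, loopBN.eq_def]
    by_cases h1 : p * p ≤ n
    · have h1' : (p : Int) * p ≤ (n : Int) := by exact_mod_cast h1
      rw [dif_pos h1', if_pos h1]
      by_cases h2 : n % p = 0
      · have h2' : PySem.Int.mod (n : Int) (p : Int) = 0 := by
          rw [PySem.Int.mod_natCast, h2]; rfl
        rw [if_pos h2', if_pos h2]
        have hbd := bridgeDivOut n n p le_rfl
        have hfle := divOutN_fst_le n p
        have hple : p ≤ n := by
          rcases Nat.eq_zero_or_pos p with h0 | h0
          · omega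
          · exact le_trans (Nat.le_mul_of_pos_left p h0) h1
        show loopB (divOutB (n:Int) (p:Int)).1 ((p:Int) + 1) ((count:Int) * ((divOutB (n:Int) (p:Int)).2 + 1)) = _
        rw [hbd]
        have := ih (divOutN n p).1 (p + 1) (count * ((divOutN n p).2 + 1)) (by omega)
        push_cast at this ⊢
        exact this
      · have h2' : ¬ (PySem.Int.mod (n : Int) (p : Int) = 0) := by
          rw [PySem.Int.mod_natCast]
          exact_mod_cast h2
        rw [if_neg h2', if_neg h2]
        have := ih n (p + 1) count (by omega)
        push_cast at this ⊢
        exact this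
    · have h1' : ¬ ((p : Int) * p ≤ (n : Int)) := by exact_mod_cast h1
      rw [dif_neg h1', if_neg h1]

-- ===== side A: loopAN counts the divisors =====
-- weighted sum over the divisors that A's loop, standing at i, still has to visit
def wsum (N i : ℕ) : ℕ :=
  ∑ d ∈ N.divisors, (if i ≤ d ∧ d * d ≤ N then (if d * d = N then 1 else 2) else 0)

theorem wsum_step (N i : ℕ) :
    wsum N i = (if i ∈ N.divisors ∧ i * i ≤ N then (if i * i = N then 1 else 2) else 0)
        + wsum N (i + 1) := by
  unfold wsum
  have hpt : ∀ d ∈ N.divisors,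
      (if i ≤ d ∧ d * d ≤ N then (if d * d = N then 1 else 2) else 0)
        = (if d = i then (if i * i ≤ N then (if i * i = N then 1 else 2) else 0) else 0)
          + (if i + 1 ≤ d ∧ d * d ≤ N then (if d * d = N then 1 else 2) else 0) := by
    intro d _
    rcases eq_or_ne d i with rfl | hne
    · simp only [le_refl, true_and]
      split_ifs <;> omega
    · rw [if_neg hne]
      split_ifs <;> omega
  rw [Finset.sum_congr rfl hpt, Finset.sum_add_distrib, Finset.sum_ite_eq' N.divisors i
    (fun _ => (if i * i ≤ N then (if i * i = N then 1 else 2) else 0))]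
  congr 1
  split_ifs <;> tauto

theorem loopAN_eq_wsum : ∀ (k i cnt N : ℕ), N + 1 - i ≤ k → 1 ≤ N →
    loopAN N i cnt = cnt + wsum N i := by
  intro k
  induction k with
  | zero =>
    intro i cnt N hk hN
    have hii : N < i * i := by
      have h2 : i ≤ i * i := Nat.le_mul_of_pos_left i (by omega)
      omega
    rw [loopAN.eq_def, if_neg (by omega)]
    have : wsum N i = 0 := by
      apply Finset.sum_eq_zero
      intro d hd
      rw [if_neg]
      rintro ⟨ha, hb⟩
      have := Nat.divisor_le hd
      omega
    omega
  | succ k ih =>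
    intro i cnt N hk hN
    rw [loopAN.eq_def]
    by_cases h1 : i * i ≤ N
    · rw [if_pos h1, wsum_step N i]
      by_cases h2 : N % i = 0
      · have hmem : i ∈ N.divisors :=
          Nat.mem_divisors.mpr ⟨Nat.dvd_of_mod_eq_zero h2, by omega⟩
        have hhead : i ∈ N.divisors ∧ i * i ≤ N := ⟨hmem, h1⟩
        rw [if_pos h2, if_pos hhead]
        by_cases h3 : i * i = N
        · rw [if_pos h3, if_pos h3, ih (i + 1) (cnt + 1) N (by omega) hN]
          omega
        · rw [if_neg h3, if_neg h3, ih (i + 1) (cnt + 2) N (by omega) hN]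
          omega
      · have hmem : ¬ (i ∈ N.divisors ∧ i * i ≤ N) := by
          rintro ⟨hd, -⟩
          rw [Nat.mem_divisors] at hd
          exact h2 (Nat.mod_eq_zero_of_dvd hd.1)
        rw [if_neg h2, if_neg hmem, ih (i + 1) cnt N (by omega) hN]
        omega
    · rw [if_neg h1, wsum_step N i, if_neg (by tauto)]
      have hz : wsum N (i + 1) = 0 := by
        apply Finset.sum_eq_zero
        intro d hd
        rw [if_neg]
        rintro ⟨ha, hb⟩
        have := Nat.mul_le_mul (show i ≤ d by omega) (show i ≤ d by omega)
        omega
      omega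

theorem pair_small {N d : ℕ} (hN : 1 ≤ N) (hdvd : d ∣ N) (hlt : N < d * d) :
    N / d ∣ N ∧ N / d * (N / d) < N := by
  obtain ⟨c, hc⟩ := hdvd
  have hdpos : 0 < d := by
    rcases Nat.eq_zero_or_pos d with h0 | h0
    · rw [h0, zero_mul] at hc; omega
    · exact h0
  have hcpos : 0 < c := by
    rcases Nat.eq_zero_or_pos c with h0 | h0
    · rw [h0, mul_zero] at hc; omega
    · exact h0
  have hcdiv : N / d = c := by rw [hc, Nat.mul_div_cancel_left c hdpos]
  have hcd : c < d := by nlinarith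
  refine ⟨?_, ?_⟩
  · rw [hcdiv]; exact ⟨d, by rw [hc, mul_comm]⟩
  · rw [hcdiv]; nlinarith

theorem pair_big {N d : ℕ} (hN : 1 ≤ N) (hdvd : d ∣ N) (hlt : d * d < N) :
    N / d ∣ N ∧ N < N / d * (N / d) := by
  obtain ⟨c, hc⟩ := hdvd
  have hdpos : 0 < d := by
    rcases Nat.eq_zero_or_pos d with h0 | h0
    · rw [h0, zero_mul] at hc; omega
    · exact h0
  have hcpos : 0 < c := by
    rcases Nat.eq_zero_or_pos c with h0 | h0
    · rw [h0, mul_zero] at hc; omega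
    · exact h0
  have hcdiv : N / d = c := by rw [hc, Nat.mul_div_cancel_left c hdpos]
  have hcd : d < c := by nlinarith
  refine ⟨?_, ?_⟩
  · rw [hcdiv]; exact ⟨d, by rw [hc, mul_comm]⟩
  · rw [hcdiv]; nlinarith

theorem wsum_one (N : ℕ) (hN : 1 ≤ N) : wsum N 1 = N.divisors.card := by
  unfold wsum
  have hpt : ∀ d ∈ N.divisors,
      (if 1 ≤ d ∧ d * d ≤ N then (if d * d = N then 1 else 2) else 0)
        = (if d * d < N then 2 else 0) + (if d * d = N then 1 else 0) := by
    intro d hd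
    have hd1 := Nat.pos_of_mem_divisors hd
    split_ifs <;> omega
  rw [Finset.sum_congr rfl hpt, Finset.sum_add_distrib, ← Finset.sum_filter, ← Finset.sum_filter,
    Finset.sum_const, Finset.sum_const, smul_eq_mul, smul_eq_mul]
  have hbij : (N.divisors.filter (fun d => N < d * d)).card
      = (N.divisors.filter (fun d => d * d < N)).card := by
    apply Finset.card_bij' (i := fun d _ => N / d) (j := fun d _ => N / d)
    · intro d hd
      rw [Finset.mem_filter] at hd ⊢
      obtain ⟨hmem, hlt⟩ := hd
      obtain ⟨h1, h2⟩ := pair_small hN (Nat.mem_divisors.mp hmem).1 hlt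
      exact ⟨Nat.mem_divisors.mpr ⟨h1, by omega⟩, h2⟩
    · intro d hd
      rw [Finset.mem_filter] at hd ⊢
      obtain ⟨hmem, hlt⟩ := hd
      obtain ⟨h1, h2⟩ := pair_big hN (Nat.mem_divisors.mp hmem).1 hlt
      exact ⟨Nat.mem_divisors.mpr ⟨h1, by omega⟩, h2⟩
    · intro d hd
      rw [Finset.mem_filter] at hd
      exact Nat.div_div_self (Nat.mem_divisors.mp hd.1).1 (by omega)
    · intro d hd
      rw [Finset.mem_filter] at hd
      exact Nat.div_div_self (Nat.mem_divisors.mp hd.1).1 (by omega)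
  have htri : N.divisors.card
      = (N.divisors.filter (fun d => d * d < N)).card
        + (N.divisors.filter (fun d => d * d = N)).card
        + (N.divisors.filter (fun d => N < d * d)).card := by
    have h1 := Finset.card_filter_add_card_filter_not
      (s := N.divisors) (p := fun d => d * d < N)
    have h2 := Finset.card_filter_add_card_filter_not
      (s := N.divisors.filter (fun d => ¬ d * d < N)) (p := fun d => d * d = N)
    rw [Finset.filter_filter, Finset.filter_filter] at h2
    have he1 : N.divisors.filter (fun d => ¬ d * d < N ∧ d * d = N)
        = N.divisors.filter (fun d => d * d = N) := by
      apply Finset.filter_congr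
      intro d _
      constructor
      · rintro ⟨-, h⟩; exact h
      · intro h; exact ⟨by omega, h⟩
    have he2 : N.divisors.filter (fun d => ¬ d * d < N ∧ ¬ d * d = N)
        = N.divisors.filter (fun d => N < d * d) := by
      apply Finset.filter_congr
      intro d _
      constructor
      · rintro ⟨ha, hb⟩; omega
      · intro h; exact ⟨by omega, by omega⟩
    rw [he1, he2] at h2
    omega
  rw [htri, hbij]
  omega

theorem loopAN_counts (N : ℕ) (hN : 1 ≤ N) : loopAN N 1 0 = N.divisors.card := by
  have := loopAN_eq_wsum (N + 1) 1 0 N (by omega) hN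
  rw [this, wsum_one N hN]
  omega

-- ===== side B: the factorisation loop counts the divisors =====
theorem divOutN_spec : ∀ (k n p : ℕ), n ≤ k → 2 ≤ p → 1 ≤ n →
    (divOutN n p).1 * p ^ (divOutN n p).2 = n ∧ ¬ p ∣ (divOutN n p).1 ∧ 1 ≤ (divOutN n p).1 := by
  intro k
  induction k with
  | zero => intro n p hk hp hn; omega
  | succ k ih =>
    intro n p hk hp hn
    rw [divOutN.eq_def]
    by_cases h : 2 ≤ p ∧ 1 ≤ n ∧ n % p = 0
    · rw [dif_pos h]
      have hdvd : p ∣ n := Nat.dvd_of_mod_eq_zero h.2.2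
      have hlt : n / p < n := Nat.div_lt_self (by omega) (by omega)
      have hq1 : 1 ≤ n / p := (Nat.one_le_div_iff (by omega)).mpr (Nat.le_of_dvd (by omega) hdvd)
      obtain ⟨ha, hb, hc⟩ := ih (n / p) p (by omega) hp hq1
      refine ⟨?_, hb, hc⟩
      show (divOutN (n / p) p).1 * p ^ ((divOutN (n / p) p).2 + 1) = n
      rw [pow_succ, ← mul_assoc, ha, Nat.div_mul_cancel hdvd]
    · rw [dif_neg h]
      have hmod : ¬ n % p = 0 := by tauto
      exact ⟨by simp, fun hdvd => hmod (Nat.mod_eq_zero_of_dvd hdvd), hn⟩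

theorem prime_of_min_factor {p n : ℕ} (hp : 2 ≤ p) (hdvd : p ∣ n) (hn : 1 ≤ n)
    (hmin : ∀ q, q.Prime → q ∣ n → p ≤ q) : p.Prime := by
  obtain ⟨q, hq, hqp⟩ := Nat.exists_prime_and_dvd (show p ≠ 1 by omega)
  have h1 : p ≤ q := hmin q hq (hqp.trans hdvd)
  have h2 : q ≤ p := Nat.le_of_dvd (by omega) hqp
  have h3 : q = p := le_antisymm h2 h1
  rwa [← h3]

theorem prime_of_no_small_factor {n p : ℕ} (hn : 1 < n) (hlt : n < p * p)
    (hmin : ∀ q, q.Prime → q ∣ n → p ≤ q) : n.Prime := by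
  have hq := Nat.minFac_prime (show n ≠ 1 by omega)
  have hqd := Nat.minFac_dvd n
  have hpq : p ≤ n.minFac := hmin _ hq hqd
  have hqm : n.minFac * (n / n.minFac) = n := Nat.mul_div_cancel' hqd
  rcases Nat.eq_zero_or_pos (n / n.minFac) with h0 | h0
  · rw [h0, mul_zero] at hqm; omega
  rcases eq_or_lt_of_le (show 1 ≤ n / n.minFac from h0) with h1 | h1
  · rw [← h1, mul_one] at hqm
    rwa [← hqm]
  · exfalso
    have hmd : n / n.minFac ∣ n := Nat.div_dvd_of_dvd hqd
    have hr := Nat.minFac_prime (show n / n.minFac ≠ 1 by omega)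
    have hrd : (n / n.minFac).minFac ∣ n := (Nat.minFac_dvd _).trans hmd
    have hpr : p ≤ (n / n.minFac).minFac := hmin _ hr hrd
    have hrm : (n / n.minFac).minFac ≤ n / n.minFac := Nat.minFac_le h0
    have : p * p ≤ n.minFac * (n / n.minFac) :=
      Nat.mul_le_mul hpq (le_trans hpr hrm)
    omega

def finishB (r : ℕ × ℕ) : ℕ := if 1 < r.1 then r.2 * 2 else r.2

theorem loopBN_terminal {n p count : ℕ} (hn : 1 ≤ n) (hlt : n < p * p)
    (hmin : ∀ q, q.Prime → q ∣ n → p ≤ q) :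
    finishB (n, count) = count * n.divisors.card := by
  unfold finishB
  rcases eq_or_lt_of_le hn with h1 | h1
  · rw [← h1]
    simp [Nat.divisors_one]
  · have hprime := prime_of_no_small_factor h1 hlt hmin
    rw [if_pos (by exact h1), Nat.Prime.divisors hprime,
      Finset.card_insert_of_notMem (by simp [(show (1:ℕ) ≠ n by omega)]), Finset.card_singleton]

theorem loopBN_spec : ∀ (k n p count : ℕ), n + 1 - p ≤ k → 1 ≤ n → 2 ≤ p →
    (∀ q, q.Prime → q ∣ n → p ≤ q) →
    finishB (loopBN n p count) = count * n.divisors.card := by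
  intro k
  induction k with
  | zero =>
    intro n p count hk hn hp hmin
    have hpp : n < p * p := by
      have h2 : p ≤ p * p := Nat.le_mul_of_pos_left p (by omega)
      omega
    rw [loopBN.eq_def, if_neg (by omega)]
    exact loopBN_terminal hn hpp hmin
  | succ k ih =>
    intro n p count hk hn hp hmin
    rw [loopBN.eq_def]
    by_cases h1 : p * p ≤ n
    · have hple : p ≤ n := le_trans (Nat.le_mul_of_pos_left p (by omega)) h1
      rw [if_pos h1]
      by_cases h2 : n % p = 0
      · rw [if_pos h2]
        have hdvd : p ∣ n := Nat.dvd_of_mod_eq_zero h2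
        have hpprime : p.Prime := prime_of_min_factor hp hdvd hn hmin
        obtain ⟨hs1, hs2, hs3⟩ := divOutN_spec n n p le_rfl hp hn
        have hfle := divOutN_fst_le n p
        have he1 : 1 ≤ (divOutN n p).2 := by
          by_contra hcon
          have : (divOutN n p).2 = 0 := by omega
          rw [this, pow_zero, mul_one] at hs1
          rw [hs1] at hs2
          exact hs2 hdvd
        have hmdvd : (divOutN n p).1 ∣ n := ⟨p ^ (divOutN n p).2, hs1.symm⟩
        have hmin' : ∀ q, q.Prime → q ∣ (divOutN n p).1 → p + 1 ≤ q := by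
          intro q hq hqd
          have hple' : p ≤ q := hmin q hq (hqd.trans hmdvd)
          rcases eq_or_lt_of_le hple' with hh | hh
          · exfalso; rw [← hh] at hqd; exact hs2 hqd
          · omega
        have := ih (divOutN n p).1 (p + 1) (count * ((divOutN n p).2 + 1)) (by omega) hs3
          (by omega) hmin'
        show finishB (loopBN (divOutN n p).1 (p + 1) (count * ((divOutN n p).2 + 1))) = _
        rw [this]
        have hco : Nat.Coprime ((divOutN n p).1) (p ^ (divOutN n p).2) :=
          Nat.Coprime.pow_right _ ((Nat.Prime.coprime_iff_not_dvd hpprime).mpr hs2).symm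
        have hmul := Nat.Coprime.card_divisors_mul hco
        rw [hs1] at hmul
        rw [hmul, Nat.divisors_prime_pow hpprime, Finset.card_map, Finset.card_range]
        ring
      · rw [if_neg h2]
        have hmin' : ∀ q, q.Prime → q ∣ n → p + 1 ≤ q := by
          intro q hq hqd
          have hple' : p ≤ q := hmin q hq hqd
          rcases eq_or_lt_of_le hple' with hh | hh
          · exfalso
            rw [← hh] at hqd
            exact h2 (Nat.mod_eq_zero_of_dvd hqd)
          · omega
        exact ih n (p + 1) count (by omega) hn (by omega) hmin'
    · rw [if_neg h1]
      exact loopBN_terminal hn (by omega) hmin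

-- ===== assembling the two sides =====
theorem solve_alt_eq (N : ℕ) (hN : 1 ≤ N) :
    Solve_alt (N : Int) = ((N.divisors.card : Int) == 9) := by
  unfold Solve_alt
  rw [if_neg (show ¬ ((N:Int) ≤ 0) by exact_mod_cast by omega)]
  have hB := bridgeB (N + 1) N 2 1 (by omega)
  push_cast at hB
  rw [hB]
  have hfin := loopBN_spec (N + 1) N 2 1 (by omega) hN le_rfl (fun q hq _ => hq.two_le)
  unfold finishB at hfin
  rw [one_mul] at hfin
  show ((if (1:Int) < (((loopBN N 2 1).1 : ℕ) : Int)
      then (((loopBN N 2 1).2 : ℕ) : Int) * 2 else (((loopBN N 2 1).2 : ℕ) : Int)) == 9)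
      = ((N.divisors.card : Int) == 9)
  have hcast : (if (1:Int) < (((loopBN N 2 1).1 : ℕ) : Int)
      then (((loopBN N 2 1).2 : ℕ) : Int) * 2 else (((loopBN N 2 1).2 : ℕ) : Int))
      = ((if 1 < (loopBN N 2 1).1 then (loopBN N 2 1).2 * 2 else (loopBN N 2 1).2 : ℕ) : Int) := by
    by_cases hm : 1 < (loopBN N 2 1).1
    · rw [if_pos (by exact_mod_cast hm), if_pos hm]
      push_cast
      ring
    · rw [if_neg (by exact_mod_cast hm), if_neg hm]
  rw [hcast, hfin]

theorem solve_eq (N : ℕ) (hN : 1 ≤ N) :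
    Solve (N : Int) = ((N.divisors.card : Int) == 9) := by
  unfold Solve
  have h1 : solveLoopA (N : Int) 1 0 = ((loopAN N 1 0 : ℕ) : Int) := by
    have := bridgeA (N + 1) 1 0 N (by omega)
    push_cast at this ⊢
    exact this
  rw [h1, loopAN_counts N hN]

-- ===== VERDICT (by name: the statement is the Claim_ definition above) =====
theorem Solve_spec : Claim_equal_Solve := by
  intro num hdom
  unfold Spec_Solve
  by_cases hpos : num ≤ 0
  · have hA : solveLoopA num 1 0 = 0 := by
      rw [solveLoopA.eq_def, dif_neg (by omega : ¬ ((1:Int) * 1 ≤ num))]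
    unfold Solve Solve_alt
    rw [if_pos hpos, hA]
    rfl
  · obtain ⟨N, rfl⟩ : ∃ N : ℕ, num = (N : Int) :=
      ⟨num.toNat, (Int.toNat_of_nonneg (by omega)).symm⟩
    have hN : 1 ≤ N := by exact_mod_cast not_le.mp hpos
    rw [solve_eq N hN, solve_alt_eq N hN]
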